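-- pv_equiv track=rewrite | github.com/afrozmiddya/Search_keyword- | main.py | search_keywords_in_text
-- ===== SOURCE A (Python) =====
-- def highlight_keyword(line, keyword):
--     """
--     Highlights the keyword in the line by wrapping it in '**'.
--     """
--     keyword_lower = keyword.lower()
--     line_lower = line.lower()
--     highlighted_line = ""
--     start = 0
--
--     # Find all occurrences of the keyword in the line (case-insensitive)
--     while True:
--         idx = line_lower.find(keyword_lower, start)
--         if idx == -1:
--             highlighted_line += line[start:]
--             break
--         # Add the part before the keyword
--         highlighted_line += line[start:idx]
--         # Add the highlighted keyword
--         highlighted_line += f"**{line[idx:idx+len(keyword)]}**"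
--         start = idx + len(keyword)
--     return highlighted_line
--
-- def search_keywords_in_text(text, keywords):
--     keyword_matches = {}
--     for keyword in keywords:
--         matches = []
--         for line_number, line in enumerate(text.splitlines(), start=1):
--             if keyword.lower() in line.lower():  # Case-insensitive search
--                 highlighted_line = highlight_keyword(line, keyword)  # Highlight the keyword
--                 matches.append((line_number, highlighted_line))
--         if matches:
--             keyword_matches[keyword] = matches
--     return keyword_matches
-- ===== SOURCE B (Python) =====
-- def _occurrences(low, kwl, k):
--     """All start positions of kwl in low, by brute-force position scan."""
--     return [i for i in range(len(low)) if low[i:i + k] == kwl]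
--
-- def _select(occ, k):
--     """Greedy leftmost non-overlapping selection from the ascending position list."""
--     chosen, end = [], 0
--     for i in occ:
--         if i >= end:
--             chosen.append(i)
--             end = i + k
--     return chosen
--
-- def _render(line, idxs, k):
--     """Rebuild the line with ** around the selected matches, joining the pieces."""
--     pieces, prev = [], 0
--     for i in idxs:
--         pieces += [line[prev:i], "**", line[i:i + k], "**"]
--         prev = i + k
--     pieces.append(line[prev:])
--     return "".join(pieces)
--
-- def search_keywords_in_text(text, keywords):
--     # Line-major single pass: split/lowercase the text once, at every position of
--     # every line test each (deduplicated) keyword by slice comparison, bucket the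
--     # rendered matches per keyword, then emit the non-empty buckets in keyword order.
--     kws = list(dict.fromkeys(keywords))
--     pats = [(kw, kw.lower(), len(kw)) for kw in kws]
--     hits = {}
--     for n, line in enumerate(text.splitlines(), 1):
--         low = line.lower()
--         for kw, kwl, k in pats:
--             occ = _occurrences(low, kwl, k)
--             if occ:
--                 hits.setdefault(kw, []).append((n, _render(line, _select(occ, k), k)))
--     return {kw: hits[kw] for kw in kws if kw in hits}
-- ===== Notes on version B (the rewrite author's own statement) =====
-- stated objective: alternative
-- what changed: B replaces A's keyword-major loop (which re-splits and re-lowercases the whole text per keyword and highlights with a sequential str.find while-loop) by a line-major single pass that splits/lowercases once, finds every occurrence of each deduplicated keyword by a brute-force slice-comparison scan over the line's positions, greedily selects the leftmost non-overlapping ones, and buckets the rendered lines per keyword, emitting the non-empty buckets in keyword order.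
import Mathlib
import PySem

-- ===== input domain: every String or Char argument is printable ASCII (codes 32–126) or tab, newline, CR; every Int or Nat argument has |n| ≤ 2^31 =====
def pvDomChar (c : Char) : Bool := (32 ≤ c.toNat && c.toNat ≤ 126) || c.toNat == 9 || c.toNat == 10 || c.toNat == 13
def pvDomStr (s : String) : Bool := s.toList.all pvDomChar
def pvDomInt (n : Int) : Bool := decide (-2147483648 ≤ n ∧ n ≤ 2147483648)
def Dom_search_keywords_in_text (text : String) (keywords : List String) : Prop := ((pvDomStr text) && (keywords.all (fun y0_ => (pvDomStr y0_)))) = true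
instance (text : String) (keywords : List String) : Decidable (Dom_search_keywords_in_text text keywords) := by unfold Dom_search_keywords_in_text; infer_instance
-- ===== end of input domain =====

-- B replaces A's keyword-major find-based scan by a line-major single pass: the
-- text is split/lowercased once, every occurrence of each deduplicated keyword is
-- found by a brute-force slice-comparison scan over the line's positions, the
-- leftmost non-overlapping ones are selected greedily, and the rendered lines are
-- bucketed per keyword (buckets emitted in keyword order).

-- ===== PORT A =====
-- Strings are handled as lists of code points (exact under the type convention);
-- the while-loop of highlight_keyword gets fuel line.length + 1: for a nonempty
-- keyword each iteration advances `start` by at least 1, so the fuel is never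
-- exhausted (with a '' keyword the Python loop spins forever and never returns;
-- Pre_ excludes those inputs).
def hlLoopA (line ll kl : List Char) (klen : Nat) : Nat → Int → List Char → List Char
  | 0, start, acc => acc ++ PySem.List.slice line (some start) none
  | fuel+1, start, acc =>
    let idx := PySem.Chars.findFrom ll kl start none
    if idx = -1 then acc ++ PySem.List.slice line (some start) none
    else hlLoopA line ll kl klen fuel (idx + klen)
      (acc ++ PySem.List.slice line (some start) (some idx) ++ ['*','*']
           ++ PySem.List.slice line (some idx) (some (idx + klen)) ++ ['*','*'])

def highlight_keyword (line keyword : String) : String :=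
  let cs := line.toList
  String.ofList (hlLoopA cs (PySem.Chars.lower cs) (PySem.Chars.lower keyword.toList)
    keyword.toList.length (cs.length + 1) 0 [])

def search_keywords_in_text (text : String) (keywords : List String) : List (String × List (Int × String)) :=
  (keywords.foldl (fun d kw =>
      let matched := (PySem.List.enumerate (PySem.Str.splitlines text) 1).foldl
        (fun ms nl =>
          if PySem.Str.isIn (PySem.Str.lower kw) (PySem.Str.lower nl.2)
          then ms ++ [(nl.1, highlight_keyword nl.2 kw)] else ms) []
      if matched = [] then d else d.insert kw matched)
    (PySem.Dict.empty : PySem.Dict String (List (Int × String)))).items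

-- ===== PORT B =====
-- _occurrences: [i for i in range(len(low)) if low[i:i+k] == kwl]
def occurrencesB (low kwl : List Char) (k : Nat) : List Int :=
  (PySem.List.pyRange 0 low.length 1).filter
    (fun i => PySem.List.slice low (some i) (some (i + (k : Int))) == kwl)

-- _select: greedy leftmost non-overlapping selection (accumulator (chosen, end))
def selectB (occ : List Int) (k : Nat) : List Int :=
  (occ.foldl (fun (st : List Int × Int) i =>
      if st.2 ≤ i then (st.1 ++ [i], i + (k : Int)) else st) ([], 0)).1

-- _render: rebuild the line from pieces and join
def renderB (line : List Char) (idxs : List Int) (k : Nat) : List Char :=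
  let st := idxs.foldl (fun (st : List (List Char) × Int) i =>
      (st.1 ++ [PySem.List.slice line (some st.2) (some i), ['*','*'],
                PySem.List.slice line (some i) (some (i + (k : Int))), ['*','*']], i + (k : Int)))
    ([], 0)
  PySem.Chars.join [] (st.1 ++ [PySem.List.slice line (some st.2) none])

-- hits.setdefault(kw, []).append(e) is ported as insert kw (getD kw [] ++ [e]):
-- setdefault-then-in-place-append overwrites kw's value at its position, which is
-- exactly PySem.Dict.insert's behaviour.  lineStepB is the body of the inner
-- 'for kw, kwl, k in pats' loop, factored out as a helper.
def lineStepB (nl : Int × String) (d : PySem.Dict String (List (Int × String))) (p : String × String × Nat) : PySem.Dict String (List (Int × String)) :=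
  let low := PySem.Str.lower nl.2
  let occ := occurrencesB low.toList p.2.1.toList p.2.2
  if occ ≠ []
  then d.insert p.1 (d.getD p.1 [] ++
        [(nl.1, String.ofList (renderB nl.2.toList (selectB occ p.2.2) p.2.2))])
  else d

def search_keywords_in_text_alt (text : String) (keywords : List String) : List (String × List (Int × String)) :=
  let kws := PySem.List.dedup keywords
  let pats := kws.map (fun kw => (kw, PySem.Str.lower kw, kw.toList.length))
  let hits := (PySem.List.enumerate (PySem.Str.splitlines text) 1).foldl
    (fun d nl => pats.foldl (lineStepB nl) d)
    (PySem.Dict.empty : PySem.Dict String (List (Int × String)))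
  (kws.foldl (fun r kw =>
      match hits.get? kw with
      | none => r
      | some ps => r.insert kw ps)
    (PySem.Dict.empty : PySem.Dict String (List (Int × String)))).items

-- ===== PRECONDITION & SPEC =====
-- Pre_ excludes exactly the inputs on which Python A never returns: with an empty
-- keyword and at least one line, highlight_keyword's while-loop (find('') at a
-- fixed start) spins forever, so A diverges there.
def Pre_search_keywords_in_text (text : String) (keywords : List String) : Prop :=
  "" ∈ keywords → text = ""
instance (text : String) (keywords : List String) : Decidable (Pre_search_keywords_in_text text keywords) := by unfold Pre_search_keywords_in_text; infer_instance

def pvWitness_search_keywords_in_text : String × List String := ("Hello world\nno match\nWORLD again", ["world", "xyz"])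

def Spec_search_keywords_in_text (text : String) (keywords : List String) (out : List (String × List (Int × String))) : Prop := out = search_keywords_in_text_alt text keywords
instance (text : String) (keywords : List String) (out : List (String × List (Int × String))) : Decidable (Spec_search_keywords_in_text text keywords out) := by unfold Spec_search_keywords_in_text; infer_instance

-- ===== CLAIM (what is proved, stated in full; the proofs are below) =====
def Claim_equal_search_keywords_in_text : Prop := ∀ (text : String) (keywords : List String), Dom_search_keywords_in_text text keywords → Pre_search_keywords_in_text text keywords → Spec_search_keywords_in_text text keywords (search_keywords_in_text text keywords)

-- ===== LEMMAS AND PROOFS =====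

-- the list of match positions A's find-loop walks through (proof helper)
def collectA (ll kl : List Char) (klen : Nat) : Nat → Int → List Int
  | 0, _ => []
  | fuel+1, start =>
    let idx := PySem.Chars.findFrom ll kl start none
    if idx = -1 then [] else idx :: collectA ll kl klen fuel (idx + klen)

-- the highlighted line written as "join the pieces delimited by the match positions"
def joinFrom (cs : List Char) (klen : Nat) : Int → List Int → List Char
  | prev, [] => PySem.List.slice cs (some prev) none
  | prev, i :: rest =>
      PySem.List.slice cs (some prev) (some i) ++ ['*','*']
        ++ PySem.List.slice cs (some i) (some (i + klen)) ++ ['*','*']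
        ++ joinFrom cs klen (i + klen) rest

-- greedy selection as structural recursion (selectB's foldl unrolled)
def gsel (k : Nat) : Int → List Int → List Int
  | _, [] => []
  | e, i :: r => if e ≤ i then i :: gsel k (i + (k : Int)) r else gsel k e r

theorem hlLoopA_eq_joinFrom (line ll kl : List Char) (klen : Nat) :
    ∀ (fuel : Nat) (start : Int) (acc : List Char),
      hlLoopA line ll kl klen fuel start acc
        = acc ++ joinFrom line klen start (collectA ll kl klen fuel start) := by
  intro fuel
  induction fuel with
  | zero => intro start acc; simp [hlLoopA, collectA, joinFrom]
  | succ n ih =>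
    intro start acc
    simp only [hlLoopA, collectA]
    by_cases h : PySem.Chars.findFrom ll kl start none = -1
    · simp [h, joinFrom]
    · simp only [h]
      rw [ih]
      simp [joinFrom, List.append_assoc]

theorem join_empty_sep_flatten : ∀ l : List (List Char), PySem.Chars.join [] l = l.flatten := by
  intro l
  induction l with
  | nil => simp [PySem.Chars.join_nil]
  | cons a l ih =>
    cases l with
    | nil => simp [PySem.Chars.join_singleton]
    | cons b r => simp [PySem.Chars.join_cons_cons] at ih ⊢; simp [ih]

theorem joinPieces (cs : List Char) (klen : Nat) :
    ∀ (idxs : List Int) (ps : List (List Char)) (prev : Int),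
      PySem.Chars.join []
        ((idxs.foldl (fun (st : List (List Char) × Int) i =>
            (st.1 ++ [PySem.List.slice cs (some st.2) (some i), ['*','*'],
                      PySem.List.slice cs (some i) (some (i + (klen : Int))), ['*','*']], i + (klen : Int))) (ps, prev)).1
          ++ [PySem.List.slice cs (some ((idxs.foldl (fun (st : List (List Char) × Int) i =>
            (st.1 ++ [PySem.List.slice cs (some st.2) (some i), ['*','*'],
                      PySem.List.slice cs (some i) (some (i + (klen : Int))), ['*','*']], i + (klen : Int))) (ps, prev)).2)) none])
        = PySem.Chars.join [] ps ++ joinFrom cs klen prev idxs := by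
  intro idxs
  induction idxs with
  | nil => intro ps prev; simp [joinFrom, join_empty_sep_flatten]
  | cons i rest ih =>
    intro ps prev
    simp only [List.foldl_cons]
    rw [ih]
    simp [joinFrom, join_empty_sep_flatten, List.append_assoc]

-- selectB's foldl is gsel
theorem selectB_foldl (k : Nat) :
    ∀ (occ : List Int) (acc : List Int) (e : Int),
      (occ.foldl (fun (st : List Int × Int) i =>
          if st.2 ≤ i then (st.1 ++ [i], i + (k : Int)) else st) (acc, e)).1
        = acc ++ gsel k e occ := by
  intro occ
  induction occ with
  | nil => intro acc e; simp [gsel]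
  | cons i r ih =>
    intro acc e
    simp only [List.foldl_cons, gsel]
    by_cases h : e ≤ i
    · simp [h, ih]
    · simp [h, ih]

theorem selectB_eq_gsel (occ : List Int) (k : Nat) : selectB occ k = gsel k 0 occ := by
  simpa using selectB_foldl k occ [] 0

-- membership in the brute-force occurrence list
theorem mem_occurrencesB (low kwl : List Char) (hk : kwl ≠ []) (i : Int) :
    i ∈ occurrencesB low kwl kwl.length ↔ ∃ j : Nat, i = (j : Int) ∧ kwl <+: low.drop j := by
  unfold occurrencesB
  simp only [List.mem_filter, PySem.List.mem_pyRange_one, beq_iff_eq]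
  constructor
  · rintro ⟨⟨h0, hlt⟩, hs⟩
    refine ⟨i.toNat, by omega, ?_⟩
    have hi : i = ((i.toNat : Nat) : Int) := by omega
    rw [hi, PySem.List.slice_natCast_add] at hs
    rw [List.prefix_iff_eq_take]
    exact hs.symm
  · rintro ⟨j, rfl, hp⟩
    have hjlt : j < low.length := by
      by_contra hge
      push_neg at hge
      rw [List.drop_of_length_le hge] at hp
      exact hk (List.prefix_nil.mp hp)
    refine ⟨⟨by omega, by omega⟩, ?_⟩
    rw [PySem.List.slice_natCast_add]
    exact (List.prefix_iff_eq_take.mp hp).symm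

-- condition/value of lineStepB, named for the statements below
abbrev cndB (p : String × String × Nat) (nl : Int × String) : Prop :=
  occurrencesB (PySem.Str.lower nl.2).toList p.2.1.toList p.2.2 ≠ []

abbrev valB (p : String × String × Nat) (nl : Int × String) : Int × String :=
  (nl.1, String.ofList (renderB nl.2.toList
    (selectB (occurrencesB (PySem.Str.lower nl.2).toList p.2.1.toList p.2.2) p.2.2) p.2.2))

theorem lineStepB_eq (nl : Int × String) (d : PySem.Dict String (List (Int × String))) (p : String × String × Nat) :
    lineStepB nl d p = if cndB p nl then d.insert p.1 (d.getD p.1 [] ++ [valB p nl]) else d := rfl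

theorem gsel_nil (k : Nat) (e : Int) :
    ∀ occ : List Int, (∀ i ∈ occ, ¬ e ≤ i) → gsel k e occ = [] := by
  intro occ
  induction occ with
  | nil => intro _; rfl
  | cons i r ih =>
    intro h
    have hi : ¬ e ≤ i := h i List.mem_cons_self
    simp only [gsel, if_neg hi]
    exact ih (fun j hj => h j (List.mem_cons_of_mem _ hj))

theorem gsel_first (k : Nat) (hk1 : 1 ≤ k) (r : Int) :
    ∀ (occ : List Int) (e : Int), occ.Pairwise (· < ·) → r ∈ occ → e ≤ r →
      (∀ i ∈ occ, e ≤ i → r ≤ i) → gsel k e occ = r :: gsel k (r + (k : Int)) occ := by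
  intro occ
  induction occ with
  | nil => intro e _ hm; exact absurd hm List.not_mem_nil
  | cons x rest ih =>
    intro e hpw hm her hmin
    by_cases hx : x = r
    · subst hx
      have hnr : ¬ (x + (k : Int) ≤ x) := by omega
      simp only [gsel, if_pos her, if_neg hnr]
    · have hr : r ∈ rest := (List.mem_cons.mp hm).resolve_left (fun h => hx h.symm)
      have hxr : x < r := (List.pairwise_cons.mp hpw).1 r hr
      have hxe : ¬ e ≤ x := by
        intro hex
        exact absurd (hmin x List.mem_cons_self hex) (by omega)
      have hxrk : ¬ (r + (k : Int) ≤ x) := by omega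
      simp only [gsel, if_neg hxe, if_neg hxrk]
      exact ih e (List.pairwise_cons.mp hpw).2 hr her
        (fun i hi hei => hmin i (List.mem_cons_of_mem _ hi) hei)

theorem pairwise_occurrencesB (low kwl : List Char) (k : Nat) :
    (occurrencesB low kwl k).Pairwise (· < ·) :=
  List.Pairwise.filter _ (PySem.List.pairwise_lt_pyRange_one 0 low.length)

theorem collectA_eq_gsel (ll kl : List Char) (hk : kl ≠ []) :
    ∀ (fuel : Nat) (e : Nat), e ≤ ll.length → ll.length + 1 ≤ fuel + e →
      collectA ll kl kl.length fuel (e : Int) = gsel kl.length (e : Int) (occurrencesB ll kl kl.length) := by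
  intro fuel
  induction fuel with
  | zero => intro e he hf; omega
  | succ n ih =>
    intro e he hf
    simp only [collectA]
    by_cases hneg : PySem.Chars.findFrom ll kl (e : Int) = -1
    · rw [if_pos hneg]
      refine (gsel_nil _ _ _ ?_).symm
      intro i hi hle
      obtain ⟨j, rfl, hp⟩ := (mem_occurrencesB ll kl hk i).mp hi
      have hej : e ≤ j := by exact_mod_cast hle
      have hdd : ll.drop j = (ll.drop e).drop (j - e) := by
        rw [List.drop_drop]; congr 1; omega
      rw [hdd] at hp
      exact ((PySem.Chars.findFrom_natCast_eq_neg_one_iff ll kl e he).mp hneg)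
        (hp.isInfix.trans (List.drop_suffix _ _).isInfix)
    · rw [if_neg hneg]
      obtain ⟨hre, hpref, hmin⟩ := PySem.Chars.findFrom_natCast_spec ll kl e he hneg
      set r : Int := PySem.Chars.findFrom ll kl (e : Int) with hr
      have hr0 : 0 ≤ r := le_trans (by exact_mod_cast Int.natCast_nonneg e) hre
      have hrn : r = ((r.toNat : Nat) : Int) := by omega
      have hrmem : r ∈ occurrencesB ll kl kl.length :=
        (mem_occurrencesB ll kl hk r).mpr ⟨r.toNat, hrn, hpref⟩
      have hk1 : 1 ≤ kl.length := List.length_pos_of_ne_nil hk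
      have hmin' : ∀ i ∈ occurrencesB ll kl kl.length, (e : Int) ≤ i → r ≤ i := by
        intro i hi hei
        obtain ⟨j, rfl, hpj⟩ := (mem_occurrencesB ll kl hk i).mp hi
        by_contra hlt
        push_neg at hlt
        exact hmin j (by exact_mod_cast hei) (by omega) hpj
      have hlen : kl.length ≤ ll.length - r.toNat := by
        have := hpref.length_le
        simpa using this
      have hstep : gsel kl.length (e : Int) (occurrencesB ll kl kl.length)
          = r :: gsel kl.length (r + (kl.length : Int)) (occurrencesB ll kl kl.length) :=
        gsel_first kl.length hk1 r _ _ (pairwise_occurrencesB ll kl kl.length) hrmem hre hmin'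
      rw [hstep]
      congr 1
      have hcast : r + (kl.length : Int) = ((r.toNat + kl.length : Nat) : Int) := by
        push_cast; omega
      rw [hcast]
      exact ih (r.toNat + kl.length) (by omega) (by omega)

theorem lower_length (l : List Char) : (PySem.Chars.lower l).length = l.length := by
  simp [PySem.Chars.lower]

theorem lower_ne_nil (l : List Char) (h : l ≠ []) : PySem.Chars.lower l ≠ [] := by
  intro hc
  apply h
  have := congrArg List.length hc
  rw [lower_length] at this
  exact List.length_eq_zero_iff.mp this

theorem render_eq_highlight (line kw : String) (hk : kw.toList ≠ []) :
    String.ofList (renderB line.toList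
      (selectB (occurrencesB (PySem.Str.lower line).toList (PySem.Str.lower kw).toList kw.toList.length) kw.toList.length)
      kw.toList.length)
      = highlight_keyword line kw := by
  have hkl : (PySem.Chars.lower kw.toList).length = kw.toList.length := lower_length _
  have hlll : (PySem.Chars.lower line.toList).length = line.toList.length := lower_length _
  have hklne : PySem.Chars.lower kw.toList ≠ [] := lower_ne_nil _ hk
  simp only [PySem.Str.toList_lower]
  rw [highlight_keyword]
  rw [hlLoopA_eq_joinFrom, List.nil_append]
  have h0 : ((0 : Nat) : Int) = (0 : Int) := rfl
  have hcoll : collectA (PySem.Chars.lower line.toList) (PySem.Chars.lower kw.toList)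
      kw.toList.length (line.toList.length + 1) 0
      = gsel kw.toList.length 0
          (occurrencesB (PySem.Chars.lower line.toList) (PySem.Chars.lower kw.toList) kw.toList.length) := by
    rw [← hkl, ← h0]
    exact collectA_eq_gsel (PySem.Chars.lower line.toList) (PySem.Chars.lower kw.toList) hklne
      (line.toList.length + 1) 0 (by omega) (by omega)
  rw [hcoll, ← selectB_eq_gsel]
  rw [renderB]
  rw [joinPieces line.toList kw.toList.length _ [] 0]
  simp [PySem.Chars.join_nil]

theorem cnd_iff_isIn (kw s : String) (hk : kw.toList ≠ []) :
    (occurrencesB (PySem.Str.lower s).toList (PySem.Str.lower kw).toList kw.toList.length ≠ [])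
      ↔ PySem.Str.isIn (PySem.Str.lower kw) (PySem.Str.lower s) = true := by
  have hkl : (PySem.Chars.lower kw.toList).length = kw.toList.length := lower_length _
  have hklne : PySem.Chars.lower kw.toList ≠ [] := lower_ne_nil _ hk
  simp only [PySem.Str.toList_lower, PySem.Str.isIn_eq]
  rw [← hkl]
  constructor
  · intro hne
    obtain ⟨i, hi⟩ := List.exists_mem_of_ne_nil _ hne
    obtain ⟨j, rfl, hp⟩ := (mem_occurrencesB _ _ hklne i).mp hi
    exact (PySem.Chars.exists_prefix_drop_iff_isIn _ _).mp ⟨j, hp⟩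
  · intro hin hnil
    obtain ⟨j, hp⟩ := (PySem.Chars.exists_prefix_drop_iff_isIn _ _).mpr hin
    have : ((j : Int)) ∈ occurrencesB (PySem.Chars.lower s.toList) (PySem.Chars.lower kw.toList)
        (PySem.Chars.lower kw.toList).length :=
      (mem_occurrencesB _ _ hklne _).mpr ⟨j, rfl, hp⟩
    rw [hnil] at this
    exact List.not_mem_nil this

theorem dedup_concat (xs : List String) (x : String) :
    PySem.List.dedup (xs ++ [x])
      = if x ∈ xs then PySem.List.dedup xs else PySem.List.dedup xs ++ [x] := by
  simp only [PySem.List.dedup_eq_ofList, PySem.Set.ofList_eq_foldl, List.foldl_append,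
    List.foldl_cons, List.foldl_nil]
  rw [← PySem.Set.ofList_eq_foldl]
  by_cases h : x ∈ xs
  · have hc : (PySem.Set.ofList xs).contains x = true :=
      (PySem.Set.contains_iff _ _).mpr ((PySem.Set.mem_ofList _ _).mpr h)
    simp [PySem.Set.add, h]
  · have hc : (PySem.Set.ofList xs).contains x = false := by
      rw [Bool.eq_false_iff]
      intro hcontra
      exact h ((PySem.Set.mem_ofList _ _).mp ((PySem.Set.contains_iff _ _).mp hcontra))
    simp [PySem.Set.add, h]

theorem dedup_of_nodup : ∀ xs : List String, xs.Nodup → PySem.List.dedup xs = xs := by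
  intro xs
  induction xs using List.reverseRecOn with
  | nil => intro _; simp [PySem.List.dedup_eq_ofList, PySem.Set.ofList_eq_foldl]
  | append_singleton xs x ih =>
    intro h
    have h' := h
    simp [List.nodup_append] at h'
    have h1 : xs.Nodup := h'.1
    have h2 : x ∉ xs := fun hx => h'.2 x hx rfl
    rw [dedup_concat, if_neg h2, ih h1]

-- a keyword-major "insert the value if it is nonempty" loop over xs builds, as items,
-- the deduplicated keys with nonempty value, each paired with its value
theorem foldl_insert_if_items (m : String → List (Int × String)) :
    ∀ xs : List String,
      ((xs.foldl (fun d kw => if m kw = [] then d else d.insert kw (m kw))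
          (PySem.Dict.empty : PySem.Dict String (List (Int × String)))).items)
        = ((PySem.List.dedup xs).filter (fun kw => decide (m kw ≠ []))).map (fun kw => (kw, m kw)) := by
  intro xs
  induction xs using List.reverseRecOn with
  | nil => rfl
  | append_singleton xs x ih =>
    rw [List.foldl_append, List.foldl_cons, List.foldl_nil, dedup_concat]
    by_cases hm : m x = []
    · rw [if_pos hm]
      split_ifs with hx
      · exact ih
      · simp [List.filter_append, hm, ih]
    · rw [if_neg hm]
      have hkeys : (xs.foldl (fun d kw => if m kw = [] then d else d.insert kw (m kw))
          (PySem.Dict.empty : PySem.Dict String (List (Int × String)))).keys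
          = ((PySem.List.dedup xs).filter (fun kw => decide (m kw ≠ []))) := by
        simp only [PySem.Dict.keys, ih, List.map_map]
        simp [Function.comp_def]
      by_cases hx : x ∈ xs
      · have hcont : (xs.foldl (fun d kw => if m kw = [] then d else d.insert kw (m kw))
            (PySem.Dict.empty : PySem.Dict String (List (Int × String)))).contains x = true := by
          rw [PySem.Dict.contains_iff_mem_keys, hkeys]
          simp [List.mem_filter, hx, hm]
        rw [PySem.Dict.items_insert_of_contains _ _ hcont, ih, if_pos hx, List.map_map]
        apply List.map_congr_left
        intro kw _
        by_cases hkw : kw = x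
        · subst hkw; simp
        · simp [Function.comp, hkw]
      · have hcont : (xs.foldl (fun d kw => if m kw = [] then d else d.insert kw (m kw))
            (PySem.Dict.empty : PySem.Dict String (List (Int × String)))).contains x = false := by
          rw [Bool.eq_false_iff]
          intro hcontra
          rw [PySem.Dict.contains_iff_mem_keys, hkeys] at hcontra
          exact hx ((PySem.List.mem_dedup _ _).mp (List.mem_of_mem_filter hcontra))
        rw [PySem.Dict.items_insert_of_not_contains _ _ hcont, ih, if_neg hx]
        simp [List.filter_append, hm]

-- the per-line inner loop over pats does not touch keys outside the pats' keys
theorem innerB_untouched (nl : Int × String) :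
    ∀ (ps : List (String × String × Nat)) (d : PySem.Dict String (List (Int × String))) (kw : String),
      kw ∉ ps.map (fun p => p.1) →
      (ps.foldl (lineStepB nl) d).get? kw = d.get? kw := by
  intro ps
  induction ps with
  | nil => intro d kw _; rfl
  | cons q ps ih =>
    intro d kw hkw
    have hne : kw ≠ q.1 := fun h => hkw (by simp [h])
    have hkw' : kw ∉ ps.map (fun p => p.1) := fun h => hkw (by simp [h])
    rw [List.foldl_cons, ih _ _ hkw', lineStepB_eq]
    split_ifs
    · exact PySem.Dict.get?_insert_of_ne _ _ hne
    · rfl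

-- effect of the per-line inner loop on the key of a pattern p of ps (keys nodup)
theorem innerB_get? (nl : Int × String) :
    ∀ (ps : List (String × String × Nat)) (d : PySem.Dict String (List (Int × String))) (p : String × String × Nat),
      (ps.map (fun p => p.1)).Nodup → p ∈ ps →
      (ps.foldl (lineStepB nl) d).get? p.1
        = if cndB p nl then some (d.getD p.1 [] ++ [valB p nl]) else d.get? p.1 := by
  intro ps
  induction ps with
  | nil => intro d p _ hmem; exact absurd hmem List.not_mem_nil
  | cons q ps ih =>
    intro d p hnd hmem
    have hq1 : q.1 ∉ ps.map (fun p => p.1) := (List.nodup_cons.mp (by simpa using hnd)).1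
    rw [List.foldl_cons]
    by_cases hpq : p = q
    · subst hpq
      rw [innerB_untouched nl ps _ p.1 hq1, lineStepB_eq]
      split_ifs with hc
      · exact PySem.Dict.get?_insert_self _ _ _
      · rfl
    · have hp : p ∈ ps := (List.mem_cons.mp hmem).resolve_left hpq
      have hne : p.1 ≠ q.1 := by
        intro h
        exact hq1 (h ▸ List.mem_map_of_mem hp)
      have hnd' : (ps.map (fun p => p.1)).Nodup := (List.nodup_cons.mp (by simpa using hnd)).2
      have hget : (lineStepB nl d q).get? p.1 = d.get? p.1 := by
        rw [lineStepB_eq]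
        split_ifs
        · exact PySem.Dict.get?_insert_of_ne _ _ hne
        · rfl
      have hgetD : (lineStepB nl d q).getD p.1 [] = d.getD p.1 [] := by
        simp [PySem.Dict.getD_eq_get?_getD, hget]
      rw [ih _ _ hnd' hp, hget, hgetD]

-- what the line-major bucketing pass leaves at the key of pattern p
theorem outerB_get? (ps : List (String × String × Nat)) (hnd : (ps.map (fun p => p.1)).Nodup)
    (p : String × String × Nat) (hmem : p ∈ ps) :
    ∀ (E : List (Int × String)) (d : PySem.Dict String (List (Int × String))),
      (E.foldl (fun d nl => ps.foldl (lineStepB nl) d) d).get? p.1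
        = match d.get? p.1 with
          | none => if (E.filter (fun nl => decide (cndB p nl))) = []
                    then none
                    else some ((E.filter (fun nl => decide (cndB p nl))).map (valB p))
          | some qs => some (qs ++ (E.filter (fun nl => decide (cndB p nl))).map (valB p)) := by
  intro E
  induction E with
  | nil =>
    intro d
    simp only [List.foldl_nil, List.filter_nil, List.map_nil]
    cases hd : d.get? p.1 <;> simp
  | cons nl E ih =>
    intro d
    rw [List.foldl_cons, ih, innerB_get? nl ps _ p hnd hmem]
    by_cases hc : cndB p nl
    · rw [if_pos hc]
      simp only [List.filter_cons, decide_eq_true_eq, if_pos hc, List.map_cons]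
      cases hd : d.get? p.1 with
      | none => simp [PySem.Dict.getD_eq_get?_getD, hd]
      | some qs => simp [PySem.Dict.getD_eq_get?_getD, hd]
    · rw [if_neg hc]
      simp only [List.filter_cons, decide_eq_true_eq, if_neg hc]

set_option maxHeartbeats 1600000 in
theorem search_keywords_in_text_eq (text : String) (keywords : List String)
    (hpre : Pre_search_keywords_in_text text keywords) :
    search_keywords_in_text text keywords = search_keywords_in_text_alt text keywords := by
  have hm : ∀ kw ∈ keywords,
      ((PySem.List.enumerate (PySem.Str.splitlines text) 1).filter
          (fun nl => PySem.Str.isIn (PySem.Str.lower kw) (PySem.Str.lower nl.2))).map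
          (fun nl => (nl.1, highlight_keyword nl.2 kw))
        = ((PySem.List.enumerate (PySem.Str.splitlines text) 1).filter
            (fun nl => decide (cndB (kw, PySem.Str.lower kw, kw.toList.length) nl))).map
            (valB (kw, PySem.Str.lower kw, kw.toList.length)) := by
    intro kw hkw
    by_cases hk : kw = ""
    · subst hk
      have ht : text = "" := hpre hkw
      subst ht
      have hE : PySem.List.enumerate (PySem.Str.splitlines "") 1 = [] := by decide
      rw [hE]
      simp
    · have hkl : kw.toList ≠ [] := fun h => hk (String.toList_eq_nil_iff.mp h)
      have hfil : (fun nl : Int × String => PySem.Str.isIn (PySem.Str.lower kw) (PySem.Str.lower nl.2))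
          = (fun nl : Int × String => decide (cndB (kw, PySem.Str.lower kw, kw.toList.length) nl)) := by
        funext nl
        rw [Bool.eq_iff_iff]
        simp only [decide_eq_true_eq]
        exact (cnd_iff_isIn kw nl.2 hkl).symm
      rw [← hfil]
      apply List.map_congr_left
      intro nl _
      exact congrArg (fun z => (nl.1, z)) (render_eq_highlight nl.2 kw hkl).symm
  have hnd : (PySem.List.dedup keywords).Nodup := PySem.List.nodup_dedup keywords
  have hpats : ((((PySem.List.dedup keywords).map
        (fun kw => (kw, PySem.Str.lower kw, kw.toList.length)))).map (fun p => p.1)).Nodup := by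
    simpa [List.map_map, Function.comp_def] using hnd
  unfold search_keywords_in_text search_keywords_in_text_alt
  simp only [PySem.List.foldl_append_if, List.nil_append]
  rw [foldl_insert_if_items (fun kw =>
      ((PySem.List.enumerate (PySem.Str.splitlines text) 1).filter
        (fun nl => PySem.Str.isIn (PySem.Str.lower kw) (PySem.Str.lower nl.2))).map
        (fun nl => (nl.1, highlight_keyword nl.2 kw))) keywords]
  rw [PySem.List.foldl_congr_mem (PySem.List.dedup keywords) _
      (fun r kw =>
        if ((PySem.List.enumerate (PySem.Str.splitlines text) 1).filter
              (fun nl => decide (cndB (kw, PySem.Str.lower kw, kw.toList.length) nl))).map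
              (valB (kw, PySem.Str.lower kw, kw.toList.length)) = []
        then r
        else r.insert kw (((PySem.List.enumerate (PySem.Str.splitlines text) 1).filter
              (fun nl => decide (cndB (kw, PySem.Str.lower kw, kw.toList.length) nl))).map
              (valB (kw, PySem.Str.lower kw, kw.toList.length))))
      PySem.Dict.empty ?hcongr]
  · rw [foldl_insert_if_items (fun kw =>
        ((PySem.List.enumerate (PySem.Str.splitlines text) 1).filter
          (fun nl => decide (cndB (kw, PySem.Str.lower kw, kw.toList.length) nl))).map
          (valB (kw, PySem.Str.lower kw, kw.toList.length))) (PySem.List.dedup keywords),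
       dedup_of_nodup _ hnd]
    have hmd : ∀ kw ∈ PySem.List.dedup keywords,
        ((PySem.List.enumerate (PySem.Str.splitlines text) 1).filter
            (fun nl => PySem.Str.isIn (PySem.Str.lower kw) (PySem.Str.lower nl.2))).map
            (fun nl => (nl.1, highlight_keyword nl.2 kw))
          = ((PySem.List.enumerate (PySem.Str.splitlines text) 1).filter
              (fun nl => decide (cndB (kw, PySem.Str.lower kw, kw.toList.length) nl))).map
              (valB (kw, PySem.Str.lower kw, kw.toList.length)) :=
      fun kw hkw => hm kw ((PySem.List.mem_dedup _ _).mp hkw)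
    rw [List.filter_congr (fun kw hkw => by rw [hmd kw hkw])]
    apply List.map_congr_left
    intro kw hkw
    rw [hmd kw (List.mem_of_mem_filter hkw)]
  case hcongr =>
    intro r kw hkw
    beta_reduce
    have h1 := outerB_get? ((PySem.List.dedup keywords).map
        (fun kw => (kw, PySem.Str.lower kw, kw.toList.length))) hpats
        (kw, PySem.Str.lower kw, kw.toList.length)
        (List.mem_map_of_mem hkw)
        (PySem.List.enumerate (PySem.Str.splitlines text) 1) PySem.Dict.empty
    simp only [PySem.Dict.get?_empty] at h1
    rw [h1]
    by_cases hfil : ((PySem.List.enumerate (PySem.Str.splitlines text) 1).filter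
        (fun nl => decide (cndB (kw, PySem.Str.lower kw, kw.toList.length) nl))) = []
    · rw [if_pos hfil, hfil]
      simp
    · rw [if_neg hfil]
      have hmapne : ¬ (List.map (valB (kw, PySem.Str.lower kw, kw.toList.length))
          (List.filter (fun nl => decide (cndB (kw, PySem.Str.lower kw, kw.toList.length) nl))
            (PySem.List.enumerate (PySem.Str.splitlines text) 1)) = []) :=
        fun h => hfil (List.map_eq_nil_iff.mp h)
      rw [if_neg hmapne]

-- ===== VERDICT (by name: the statement is the Claim_ definition above) =====
theorem search_keywords_in_text_spec : Claim_equal_search_keywords_in_text := by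
  intro text keywords _ hpre
  exact search_keywords_in_text_eq text keywords hpre
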